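-- pv_equiv track=rewrite | github.com/vishnuodeyar/MoocFi-Python | MoocFi_python_part_4/all_the_longest_in_the_list.py | all_the_longest_in_the_list
-- ===== SOURCE A (Python) =====
-- def all_the_longest_in_the_list(my_list : list):
--   longest = " "
--   new_list = []
--   for i in my_list:
--     if len(i) > len(longest):
--       longest = i
--   for i in my_list:
--     if len(i) == len(longest):
--       new_list.append(i)
--   return new_list
-- ===== SOURCE B (Python) =====
-- def all_the_longest_in_the_list(my_list: list):
--     best_len = 0
--     result = []
--     for s in my_list:
--         n = len(s)
--         if n > best_len:
--             best_len = n
--             result = [s]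
--         elif n == best_len:
--             result.append(s)
--     return result
-- ===== Notes on version B (the rewrite author's own statement) =====
-- stated objective: alternative
-- what changed: Single pass maintaining the running best length and the running answer list (reset on a new maximum, append on a tie) instead of A's two sequential scans (find the longest via a ' ' sentinel, then filter by its length).
-- intended difference: On nonempty lists whose strings are all empty, A returns an empty result because its sentinel ' ' has length 1 and nothing matches it, while B returns the whole input list, which is the intended set of longest strings. — e.g. on all_the_longest_in_the_list([""]): A returns [], B returns [""]
import Mathlib
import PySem

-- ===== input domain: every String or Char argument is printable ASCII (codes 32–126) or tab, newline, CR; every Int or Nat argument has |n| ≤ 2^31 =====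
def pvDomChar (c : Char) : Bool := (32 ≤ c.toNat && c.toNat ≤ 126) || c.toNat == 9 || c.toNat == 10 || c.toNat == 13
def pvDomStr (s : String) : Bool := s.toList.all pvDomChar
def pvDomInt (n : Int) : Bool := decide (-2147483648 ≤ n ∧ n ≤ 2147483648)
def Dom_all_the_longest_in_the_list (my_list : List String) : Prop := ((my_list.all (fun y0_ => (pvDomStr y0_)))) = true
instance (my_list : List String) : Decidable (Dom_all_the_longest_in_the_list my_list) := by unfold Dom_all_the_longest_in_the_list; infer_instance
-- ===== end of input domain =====

-- B collects all longest strings in ONE pass (running best length + running answer); A does two scans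
-- with a " " sentinel. Return-value equivalence is proved outside D_ (where A's sentinel misses all-empty lists).

-- ===== PORT A =====
def all_the_longest_in_the_list (my_list : List String) : List String :=
  let longest := my_list.foldl
    (fun longest i => if PySem.Str.len i > PySem.Str.len longest then i else longest) " "
  let new_list := my_list.foldl
    (fun new_list i => if PySem.Str.len i = PySem.Str.len longest then new_list ++ [i] else new_list) []
  new_list

-- ===== PORT B =====
def all_the_longest_in_the_list_alt (my_list : List String) : List String :=
  (my_list.foldl
    (fun st s =>
      let n := PySem.Str.len s
      if n > st.1 then (n, [s])
      else if n = st.1 then (st.1, st.2 ++ [s])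
      else st)
    ((0 : Int), ([] : List String))).2

-- ===== PRECONDITION & SPEC =====
-- On nonempty lists whose strings are all empty, A returns an empty result (its sentinel " " has length 1 and
-- nothing matches it) while B returns the whole list, the intended set of longest strings.
def D_all_the_longest_in_the_list (my_list : List String) : Prop :=
  my_list ≠ [] ∧ ∀ s ∈ my_list, PySem.Str.len s = 0
instance (my_list : List String) : Decidable (D_all_the_longest_in_the_list my_list) := by
  unfold D_all_the_longest_in_the_list; infer_instance

def Spec_all_the_longest_in_the_list (my_list : List String) (out : List String) : Prop :=
  ¬ D_all_the_longest_in_the_list my_list → out = all_the_longest_in_the_list_alt my_list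
instance (my_list : List String) (out : List String) : Decidable (Spec_all_the_longest_in_the_list my_list out) := by
  unfold Spec_all_the_longest_in_the_list; infer_instance

def pvDiffWitness_all_the_longest_in_the_list : List String := [""]
def pvDiffWitnessOut_all_the_longest_in_the_list : (List String) × (List String) := ([], [""])

-- ===== CLAIM =====
def Claim_unchanged_all_the_longest_in_the_list : Prop := ∀ (my_list : List String), Dom_all_the_longest_in_the_list my_list → Spec_all_the_longest_in_the_list my_list (all_the_longest_in_the_list my_list)
def Claim_changed_all_the_longest_in_the_list : Prop := Dom_all_the_longest_in_the_list (pvDiffWitness_all_the_longest_in_the_list) ∧ D_all_the_longest_in_the_list (pvDiffWitness_all_the_longest_in_the_list) ∧ all_the_longest_in_the_list (pvDiffWitness_all_the_longest_in_the_list) = pvDiffWitnessOut_all_the_longest_in_the_list.1 ∧ all_the_longest_in_the_list_alt (pvDiffWitness_all_the_longest_in_the_list) = pvDiffWitnessOut_all_the_longest_in_the_list.2 ∧ pvDiffWitnessOut_all_the_longest_in_the_list.1 ≠ pvDiffWitnessOut_all_the_longest_in_the_list.2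
def Claim_exact_all_the_longest_in_the_list : Prop := ∀ (my_list : List String), Dom_all_the_longest_in_the_list my_list → D_all_the_longest_in_the_list my_list → all_the_longest_in_the_list my_list ≠ all_the_longest_in_the_list_alt my_list

-- ===== LEMMAS AND PROOFS =====

/-- running maximum of lengths -/
def foldMax (b : Int) (xs : List String) : Int :=
  xs.foldl (fun m s => max m (PySem.Str.len s)) b

lemma foldMax_cons (b : Int) (s : String) (t : List String) :
    foldMax b (s :: t) = foldMax (max b (PySem.Str.len s)) t := rfl

lemma le_foldMax (b : Int) (xs : List String) : b ≤ foldMax b xs := by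
  induction xs generalizing b with
  | nil => simp [foldMax]
  | cons s t ih =>
    calc b ≤ max b (PySem.Str.len s) := le_max_left _ _
    _ ≤ foldMax (max b (PySem.Str.len s)) t := ih _
    _ = foldMax b (s :: t) := rfl

lemma foldMax_max (a b : Int) (xs : List String) :
    foldMax (max a b) xs = max a (foldMax b xs) := by
  induction xs generalizing b with
  | nil => simp [foldMax]
  | cons s t ih =>
    rw [foldMax_cons, foldMax_cons, max_assoc, ih]

lemma len_mem_le_foldMax (b : Int) {xs : List String} {s : String} (h : s ∈ xs) :
    PySem.Str.len s ≤ foldMax b xs := by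
  induction xs generalizing b with
  | nil => cases h
  | cons x t ih =>
    rw [foldMax_cons]
    rcases List.mem_cons.mp h with rfl | h
    · exact le_trans (le_max_right _ _) (le_foldMax _ _)
    · exact ih _ h

/-- A's first loop returns a string whose length is foldMax (len init) -/
lemma lenA (init : String) (xs : List String) :
    PySem.Str.len (xs.foldl (fun longest i =>
      if PySem.Str.len i > PySem.Str.len longest then i else longest) init)
    = foldMax (PySem.Str.len init) xs := by
  induction xs generalizing init with
  | nil => simp [foldMax]
  | cons s t ih =>
    rw [List.foldl_cons, foldMax_cons]
    by_cases h : PySem.Str.len s > PySem.Str.len init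
    · rw [if_pos h, ih, max_eq_right (le_of_lt h)]
    · rw [if_neg h, ih, max_eq_left (le_of_not_gt h)]

/-- A's second loop is acc ++ filter -/
lemma filterA (L : Int) (acc : List String) (xs : List String) :
    xs.foldl (fun new_list i =>
      if PySem.Str.len i = L then new_list ++ [i] else new_list) acc
    = acc ++ xs.filter (fun s => PySem.Str.len s = L) := by
  induction xs generalizing acc with
  | nil => simp
  | cons s t ih =>
    rw [List.foldl_cons]
    by_cases h : PySem.Str.len s = L
    · rw [if_pos h, ih]
      simp only [PySem.Str.len_eq, String.length_toList] at h
      simp [h]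
    · rw [if_neg h, ih]
      simp only [PySem.Str.len_eq, String.length_toList] at h
      simp [h]

/-- invariant of B's single pass -/
lemma foldB (b : Int) (res : List String) (xs : List String) :
    xs.foldl
      (fun st s =>
        let n := PySem.Str.len s
        if n > st.1 then (n, [s])
        else if n = st.1 then (st.1, st.2 ++ [s])
        else st)
      (b, res)
    = (foldMax b xs,
       if foldMax b xs > b then xs.filter (fun s => PySem.Str.len s = foldMax b xs)
       else res ++ xs.filter (fun s => PySem.Str.len s = b)) := by
  induction xs generalizing b res with
  | nil => simp [foldMax]
  | cons s t ih =>
    rw [List.foldl_cons, foldMax_cons]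
    set n := PySem.Str.len s with hn
    have hsl : (s.length : Int) = n := by simp [hn, PySem.Str.len_eq]
    by_cases h1 : n > b
    · simp only [if_pos h1]
      rw [ih]
      rw [max_eq_right (le_of_lt h1)]
      have hM : foldMax n t > b := lt_of_lt_of_le h1 (le_foldMax _ _)
      rw [if_pos hM]
      by_cases h2 : foldMax n t > n
      · rw [if_pos h2]
        have hne : ¬ ((s.length : Int) = foldMax n t) := by omega
        simp [hne]
      · rw [if_neg h2]
        have he : foldMax n t = n := le_antisymm (le_of_not_gt h2) (le_foldMax _ _)
        have heq : (s.length : Int) = foldMax n t := by omega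
        simp [heq, he]
    · by_cases h2 : n = b
      · simp only [if_neg h1, if_pos h2]
        rw [ih, h2, max_self]
        by_cases hM : foldMax b t > b
        · rw [if_pos hM, if_pos hM]
          have hne : ¬ ((s.length : Int) = foldMax b t) := by omega
          simp [hne]
        · rw [if_neg hM, if_neg hM]
          have heq : (s.length : Int) = b := by omega
          simp [heq]
      · simp only [if_neg h1, if_neg h2]
        rw [ih, max_eq_left (le_of_not_gt h1)]
        by_cases hM : foldMax b t > b
        · rw [if_pos hM, if_pos hM]
          have hle := le_foldMax b t
          have hne : ¬ ((s.length : Int) = foldMax b t) := by omega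
          simp [hne]
        · rw [if_neg hM, if_neg hM]
          have hne : ¬ ((s.length : Int) = b) := by omega
          simp [hne]

lemma len_space : PySem.Str.len " " = 1 := by decide

lemma altB (xs : List String) :
    all_the_longest_in_the_list_alt xs =
      (if foldMax 0 xs > 0 then xs.filter (fun s => PySem.Str.len s = foldMax 0 xs)
       else xs.filter (fun s => PySem.Str.len s = 0)) := by
  unfold all_the_longest_in_the_list_alt
  rw [foldB]
  split_ifs <;> simp

lemma len_nonneg (s : String) : 0 ≤ PySem.Str.len s := by
  simp [PySem.Str.len_eq]

lemma foldMax_one (xs : List String) : foldMax 1 xs = max 1 (foldMax 0 xs) := by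
  have := foldMax_max 1 0 xs
  simpa using this

lemma foldMax_zero_of_all {xs : List String} (hall : ∀ s ∈ xs, PySem.Str.len s = 0) :
    foldMax 0 xs = 0 := by
  induction xs with
  | nil => rfl
  | cons s t ih =>
    rw [foldMax_cons, hall s (by simp), max_self]
    exact ih (fun u hu => hall u (List.mem_cons_of_mem _ hu))

-- ===== VERDICT =====
theorem all_the_longest_in_the_list_spec : Claim_unchanged_all_the_longest_in_the_list := by
  intro xs _ hD
  show all_the_longest_in_the_list xs = all_the_longest_in_the_list_alt xs
  rw [altB]
  unfold all_the_longest_in_the_list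
  simp only []
  rw [filterA, lenA, len_space, foldMax_one]
  simp only [List.nil_append]
  by_cases hpos : foldMax 0 xs > 0
  · rw [if_pos hpos, max_eq_right (by omega)]
  · rw [if_neg hpos]
    have h0 : foldMax 0 xs = 0 := le_antisymm (le_of_not_gt hpos) (le_foldMax 0 xs)
    have hall : ∀ s ∈ xs, PySem.Str.len s = 0 := by
      intro s hs
      have h1 := len_mem_le_foldMax 0 hs
      have h2 := len_nonneg s
      omega
    cases xs with
    | nil => rfl
    | cons y t =>
      exact absurd ⟨List.cons_ne_nil y t, hall⟩ hD

theorem all_the_longest_in_the_list_changed : Claim_changed_all_the_longest_in_the_list := by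
  unfold Claim_changed_all_the_longest_in_the_list; decide

theorem all_the_longest_in_the_list_tight : Claim_exact_all_the_longest_in_the_list := by
  intro xs _ hD
  obtain ⟨hne, hall⟩ := hD
  have hM0 : foldMax 0 xs = 0 := foldMax_zero_of_all hall
  have hA : all_the_longest_in_the_list xs = [] := by
    unfold all_the_longest_in_the_list
    simp only []
    rw [filterA, lenA, len_space, foldMax_one, hM0]
    simp only [List.nil_append, List.filter_eq_nil_iff]
    intro s hs
    have h1 := hall s hs
    simp only [PySem.Str.len_eq, String.length_toList] at h1
    simp only [PySem.Str.len_eq, String.length_toList, decide_eq_true_eq]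
    omega
  have hB : all_the_longest_in_the_list_alt xs = xs := by
    rw [altB, hM0]
    simp only [gt_iff_lt, lt_irrefl, if_false, List.filter_eq_self]
    intro s hs
    have h1 := hall s hs
    simp only [PySem.Str.len_eq, String.length_toList] at h1
    simp only [PySem.Str.len_eq, String.length_toList, decide_eq_true_eq]
    omega
  rw [hA, hB]
  exact fun h => hne h.symm
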